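-- pv_equiv track=rewrite | github.com/baezaguasch/MonodromyNND | PlaneCurves.py | Beta_from_series_exp
-- ===== SOURCE A (Python) =====
-- from math import gcd
--
-- def Beta_from_series_exp(n,Exps):
-- 	"""
-- 	Returns Puiseux characteristic exponents Beta given the multiplicity n and the
-- 	exponents Exps appearing in the Puiseux series of a good parametrization.
-- 	"""
--
-- 	Beta = [n]
-- 	e = [n]
--
-- 	e_curr = n
-- 	while e_curr != 1:
-- 		index = 0
-- 		while (Exps[index]%e_curr == 0):
-- 			index += 1
--
-- 		beta_curr = Exps[index]
-- 		e_curr = gcd(e_curr, beta_curr)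
--
-- 		Beta.append(beta_curr)
-- 		e.append(e_curr)
--
-- 	return Beta, e
--
-- Beta = [4,6,7]
-- ===== SOURCE B (Python) =====
-- from math import gcd
--
-- def Beta_from_series_exp(n, Exps):
--     """
--     Same result as A, but in a single forward pass over Exps: since each new
--     e_curr divides the previous one, every exponent skipped once stays
--     divisible forever, so the scan index never needs to restart at 0.
--     """
--     Beta = [n]
--     e = [n]
--     g = n
--     for x in Exps:
--         if g == 1:
--             break
--         if x % g != 0:
--             g = gcd(g, x)
--             Beta.append(x)
--             e.append(g)
--     return Beta, e
-- ===== Notes on version B (the rewrite author's own statement) =====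
-- stated objective: simpler
-- what changed: B replaces A's nested while loops (inner divisibility scan restarting at index 0 on every outer iteration) by a single for loop over Exps carrying the running gcd, since each new e_curr divides the previous one and skipped exponents stay divisible.
import Mathlib
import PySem

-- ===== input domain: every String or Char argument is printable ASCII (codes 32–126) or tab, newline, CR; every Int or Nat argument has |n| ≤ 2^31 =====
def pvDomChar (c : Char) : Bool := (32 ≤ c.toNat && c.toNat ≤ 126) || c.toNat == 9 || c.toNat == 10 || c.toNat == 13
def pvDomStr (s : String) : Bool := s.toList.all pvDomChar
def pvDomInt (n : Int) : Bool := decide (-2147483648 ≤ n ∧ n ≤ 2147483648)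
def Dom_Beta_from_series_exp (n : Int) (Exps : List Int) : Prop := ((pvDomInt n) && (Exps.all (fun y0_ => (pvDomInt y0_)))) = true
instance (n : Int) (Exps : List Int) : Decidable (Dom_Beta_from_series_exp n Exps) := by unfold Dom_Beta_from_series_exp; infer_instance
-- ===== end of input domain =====

-- B does Puiseux characteristic exponents in ONE forward pass over Exps instead of
-- restarting A's inner divisibility scan at index 0 on every outer iteration.


-- ===== PORT A =====
-- inner 'while Exps[index] % e_curr == 0: index += 1' followed by 'beta_curr = Exps[index]':
-- first element not divisible by e; none = IndexError (list exhausted) or ZeroDivisionError (e = 0)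
def pvScanA (e : Int) : List Int → Option Int
  | [] => none
  | x :: rest =>
    match PySem.Int.mod? x e with
    | none => none
    | some r => if r = 0 then pvScanA e rest else some x

-- outer 'while e_curr != 1' with fuel (none = an exception escaped the loop or fuel ran out;
-- Pre_ guarantees Exps.length + 1 iterations suffice)
def pvLoopA (Exps : List Int) : Int → List Int → List Int → Nat → Option (List Int × List Int)
  | _, _, _, 0 => none
  | e, Beta, es, fuel + 1 =>
    if e = 1 then some (Beta, es)
    else
      match pvScanA e Exps with
      | none => none
      | some b =>
        let e' : Int := Int.gcd e b
        pvLoopA Exps e' (Beta ++ [b]) (es ++ [e']) fuel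

def Beta_from_series_exp (n : Int) (Exps : List Int) : List Int × List Int :=
  (pvLoopA Exps n [n] [n] (Exps.length + 1)).getD ([n], [n])

-- ===== PORT B =====
-- 'for x in Exps: if g == 1: break; if x % g != 0: g = gcd(g, x); Beta.append(x); e.append(g)'
def pvLoopB : Int → List Int → List Int → List Int → List Int × List Int
  | _, [], Beta, es => (Beta, es)
  | g, x :: rest, Beta, es =>
    if g = 1 then (Beta, es)
    else
      match PySem.Int.mod? x g with
      | some 0 => pvLoopB g rest Beta es
      | _ =>
        let g' : Int := Int.gcd g x
        pvLoopB g' rest (Beta ++ [x]) (es ++ [g'])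

def Beta_from_series_exp_alt (n : Int) (Exps : List Int) : List Int × List Int :=
  pvLoopB n Exps [n] [n]

-- ===== PRECONDITION & SPEC =====
-- running gcd of |n| and the |exponents|
def pvG (s : Nat) (l : List Int) : Nat := l.foldl (fun a x => Nat.gcd a x.natAbs) s

-- A returns normally exactly when n ∉ {0, -1} and gcd(n, all of Exps) = 1: for n = 0 the first
-- scan raises, for n = -1 every scan runs off the end (everything is divisible by -1), and for
-- a gcd ≠ 1 some scan finds no non-divisible exponent (IndexError).
def Pre_Beta_from_series_exp (n : Int) (Exps : List Int) : Prop :=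
  n ≠ 0 ∧ n ≠ -1 ∧ pvG n.natAbs Exps = 1
instance (n : Int) (Exps : List Int) : Decidable (Pre_Beta_from_series_exp n Exps) := by
  unfold Pre_Beta_from_series_exp; infer_instance

def pvWitness_Beta_from_series_exp : Int × List Int := (4, [6, 7])

def Spec_Beta_from_series_exp (n : Int) (Exps : List Int) (out : List Int × List Int) : Prop := out = Beta_from_series_exp_alt n Exps
instance (n : Int) (Exps : List Int) (out : List Int × List Int) : Decidable (Spec_Beta_from_series_exp n Exps out) := by unfold Spec_Beta_from_series_exp; infer_instance

-- ===== CLAIM (what is proved, stated in full; the proofs are below) =====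
def Claim_equal_Beta_from_series_exp : Prop := ∀ (n : Int) (Exps : List Int), Dom_Beta_from_series_exp n Exps → Pre_Beta_from_series_exp n Exps → Spec_Beta_from_series_exp n Exps (Beta_from_series_exp n Exps)


-- ===== LEMMAS AND PROOFS =====

theorem pv_mod?_some_zero {x e : Int} (he : e ≠ 0) : PySem.Int.mod? x e = some 0 ↔ e ∣ x :=
  PySem.Int.mod?_eq_some_zero_iff_dvd he

-- a prefix all divisible by e is skipped by the scan
theorem pvScanA_append {e : Int} (he : e ≠ 0) (pre l : List Int)
    (h : ∀ x ∈ pre, e ∣ x) : pvScanA e (pre ++ l) = pvScanA e l := by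
  induction pre with
  | nil => rfl
  | cons y ys ih =>
    have hy : e ∣ y := h y (by simp)
    have hm : PySem.Int.mod? y e = some 0 := (pv_mod?_some_zero he).mpr hy
    simp only [List.cons_append, pvScanA, hm]
    exact ih (fun x hx => h x (by simp [hx]))

theorem pvG_one_of_dvd {e : Int} {x : Int} (h : e ∣ x) (l : List Int) :
    pvG e.natAbs (x :: l) = pvG e.natAbs l := by
  have : Nat.gcd e.natAbs x.natAbs = e.natAbs :=
    Nat.gcd_eq_left (Int.natAbs_dvd_natAbs.mpr h)
  simp [pvG, this]

-- main invariant: with the scanned prefix all divisible by e, A's restart-from-zero loop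
-- computes exactly B's single pass over the remaining suffix
theorem pv_main (suf : List Int) : ∀ (pre : List Int) (e : Int) (B E : List Int) (fuel : Nat),
    (∀ x ∈ pre, e ∣ x) → e ≠ 0 → e ≠ -1 → pvG e.natAbs suf = 1 → suf.length < fuel →
    pvLoopA (pre ++ suf) e B E fuel = some (pvLoopB e suf B E) := by
  induction suf with
  | nil =>
    intro pre e B E fuel hpre he hne1 hg hf
    have he1 : e = 1 := by
      have : e.natAbs = 1 := hg
      rcases Int.natAbs_eq e with h | h <;> omega
    subst he1
    obtain ⟨f, rfl⟩ : ∃ f, fuel = f + 1 := ⟨fuel - 1, by omega⟩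
    simp [pvLoopA, pvLoopB]
  | cons x rest ih =>
    intro pre e B E fuel hpre he hne1 hg hf
    obtain ⟨f, rfl⟩ : ∃ f, fuel = f + 1 := ⟨fuel - 1, by omega⟩
    by_cases he1 : e = 1
    · subst he1; simp [pvLoopA, pvLoopB]
    · by_cases hdvd : e ∣ x
      · -- skipped element: same A-call viewed with a longer divisible prefix
        have hm : PySem.Int.mod? x e = some 0 := (pv_mod?_some_zero he).mpr hdvd
        have hre : pre ++ x :: rest = (pre ++ [x]) ++ rest := by simp
        rw [hre, ih (pre ++ [x]) e B E (f + 1)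
            (by intro y hy; rcases List.mem_append.mp hy with h | h
                · exact hpre y h
                · simp at h; subst h; exact hdvd)
            he hne1
            (by have := pvG_one_of_dvd hdvd rest; rw [← this]; exact hg)
            (by simpa using Nat.lt_of_succ_lt hf)]
        simp [pvLoopB, he1, hm]
      · -- selected element
        have hm0 : PySem.Int.mod? x e ≠ some 0 := fun h => hdvd ((pv_mod?_some_zero he).mp h)
        have hscan : pvScanA e (pre ++ x :: rest) = some x := by
          rw [pvScanA_append he pre _ hpre]
          rcases hr : PySem.Int.mod? x e with _ | r
          · exact absurd (by simpa [PySem.Int.mod?] using hr) he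
          · have : r ≠ 0 := fun h => hm0 (by rw [hr, h])
            simp [pvScanA, hr, this]
        have hg0 : Int.gcd e x ≠ 0 := fun h => he (by simpa using (Int.gcd_eq_zero_iff.mp h).1)
        have hdvd' : (Int.gcd e x : Int) ∣ e := Int.gcd_dvd_left e x
        have hdvdx : (Int.gcd e x : Int) ∣ x := Int.gcd_dvd_right e x
        have hre : pre ++ x :: rest = (pre ++ [x]) ++ rest := by simp
        have hstep := ih (pre ++ [x]) (Int.gcd e x) (B ++ [x]) (E ++ [(Int.gcd e x : Int)]) f
            (by intro y hy; rcases List.mem_append.mp hy with h | h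
                · exact dvd_trans hdvd' (hpre y h)
                · simp at h; subst h; exact hdvdx)
            (by exact_mod_cast hg0)
            (by intro h; exact hg0 (by exact_mod_cast (by omega : (Int.gcd e x : Int) = 0)))
            (by have heq : (Int.gcd e x : Int).natAbs = Nat.gcd e.natAbs x.natAbs := by
                  simp [Int.gcd]
                rw [heq]; simpa [pvG] using hg)
            (by simpa using Nat.lt_of_succ_lt_succ hf)
        simp only [pvLoopA, if_neg he1, hscan]
        rw [← hre] at hstep
        rw [hstep]
        have hb : pvLoopB e (x :: rest) B E
            = pvLoopB (Int.gcd e x) rest (B ++ [x]) (E ++ [(Int.gcd e x : Int)]) := by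
          rcases hr : PySem.Int.mod? x e with _ | r
          · simp [pvLoopB, he1, hr]
          · have : r ≠ 0 := fun h => hm0 (by rw [hr, h])
            simp [pvLoopB, he1, hr, this]
        rw [hb]

-- ===== VERDICT (by name: the statement is the Claim_ definition above) =====
theorem Beta_from_series_exp_spec : Claim_equal_Beta_from_series_exp := by
  intro n Exps _ hpre
  obtain ⟨h0, h1, hg⟩ := hpre
  unfold Spec_Beta_from_series_exp Beta_from_series_exp Beta_from_series_exp_alt
  have := pv_main Exps [] n [n] [n] (Exps.length + 1) (by simp) h0 h1 hg (by omega)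
  simp at this
  rw [this]
  rfl
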